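-- pv_equiv track=rewrite | github.com/lukaszeckert/advent-of-code | 2023/day14/main.py | push_front
-- ===== SOURCE A (Python) =====
-- def push_front(row: list):
--     changed = False
--
--     for _ in range(len(row)):
--         changed = False
--         for i in range(1, len(row)):
--             if row[i-1] == "." and row[i] == "O":
--                 changed = True
--                 row[i-1], row[i] = row[i], row[i-1]
--                 row[i-1], row[i] = row[i], row[i-1]
--
--     for _ in range(len(row)):
--         changed = False
--         for i in range(1, len(row)):
--             if row[i-1] == "." and row[i] == "O":
--                 changed = True
--                 row[i-1], row[i] = row[i], row[i-1]
--         if not changed: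
--             break
--
--     return row
-- ===== SOURCE B (Python) =====
-- def push_front(row: list):
--     # Single pass: within each '#'-bounded segment, count O's and .'s and emit O's first.
--     out = []
--     o = d = 0
--     for x in row:
--         if x == "O":
--             o += 1
--         elif x == ".":
--             d += 1
--         else:
--             out.extend(["O"] * o)
--             out.extend(["."] * d)
--             out.append(x)
--             o = d = 0
--     out.extend(["O"] * o)
--     out.extend(["."] * d)
--     return out
-- ===== Notes on version B (the rewrite author's own statement) =====
-- stated objective: faster
-- what changed: Replaced the repeated bubble passes (len(row) no-op double-swap passes plus up to len(row) swapping passes) by a single left-to-right pass that counts 'O's and '.'s per '#'-bounded segment and emits the O's then the dots; note A mutates its argument in place while B builds a fresh list (equivalence is about the return value).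
import Mathlib
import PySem

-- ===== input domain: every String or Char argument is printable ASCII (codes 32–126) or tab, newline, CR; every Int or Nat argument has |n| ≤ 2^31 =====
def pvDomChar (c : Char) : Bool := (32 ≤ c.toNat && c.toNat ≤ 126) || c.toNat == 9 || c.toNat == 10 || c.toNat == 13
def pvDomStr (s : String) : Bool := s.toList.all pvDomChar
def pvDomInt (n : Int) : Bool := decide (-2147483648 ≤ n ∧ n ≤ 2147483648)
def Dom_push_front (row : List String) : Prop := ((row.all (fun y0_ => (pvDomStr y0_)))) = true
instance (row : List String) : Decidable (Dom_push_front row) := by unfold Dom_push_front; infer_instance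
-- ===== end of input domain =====

-- B replaces A's repeated bubble passes by one counting pass per '#'-bounded segment (asymptotically faster).
-- A mutates its argument in place; the equivalence proved here is about the RETURN value only.

-- ===== PORT A =====

-- A's first loop: at each adjacent (".","O") pair it swaps twice (a net no-op), then moves on.
def pvPass1 (l : List String) : List String :=
  match l with
  | [] => []
  | [a] => [a]
  | a :: b :: t =>
    if a = "." ∧ b = "O" then
      -- row[i-1],row[i] = row[i],row[i-1] performed twice: back to (a, b)
      let s1 : String × String := (b, a)
      let s2 : String × String := (s1.2, s1.1)
      s2.1 :: pvPass1 (s2.2 :: t)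
    else
      a :: pvPass1 (b :: t)

-- A's second-loop inner pass: one left-to-right sweep of in-place swaps; returns (row, changed).
def pvPass (l : List String) : List String × Bool :=
  match l with
  | [] => ([], false)
  | [a] => ([a], false)
  | a :: b :: t =>
    if a = "." ∧ b = "O" then
      let r := pvPass ("." :: t)
      ("O" :: r.1, true)
    else
      let r := pvPass (b :: t)
      (a :: r.1, r.2)
termination_by l.length
decreasing_by all_goals (simp; try omega)

-- A's first outer loop: len(row) sweeps, no break (`changed` is dead there).
def pvLoop1 : Nat → List String → List String
  | 0, r => r
  | n + 1, r => pvLoop1 n (pvPass1 r)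

-- A's second outer loop: up to len(row) sweeps, breaking when a sweep made no swap.
def pvLoop2 : Nat → List String → List String
  | 0, r => r
  | n + 1, r =>
    let p := pvPass r
    if p.2 then pvLoop2 n p.1 else p.1

def push_front (row : List String) : List String :=
  pvLoop2 row.length (pvLoop1 row.length row)

-- ===== PORT B =====

-- counters o (O's seen) and d (.'s seen) in the current segment; flush at a barrier and at the end
def pvAltGo (o d : Nat) (l : List String) : List String :=
  match l with
  | [] => List.replicate o "O" ++ List.replicate d "."
  | x :: t =>
    if x = "O" then pvAltGo (o + 1) d t
    else if x = "." then pvAltGo o (d + 1) t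
    else List.replicate o "O" ++ List.replicate d "." ++ x :: pvAltGo 0 0 t

def push_front_alt (row : List String) : List String := pvAltGo 0 0 row

-- ===== PRECONDITION & SPEC =====
def Spec_push_front (row : List String) (out : List String) : Prop := out = push_front_alt row
instance (row : List String) (out : List String) : Decidable (Spec_push_front row out) := by unfold Spec_push_front; infer_instance

-- ===== CLAIM (what is proved, stated in full; the proofs are below) =====
def Claim_equal_push_front : Prop := ∀ (row : List String), Dom_push_front row → Spec_push_front row (push_front row)

-- ===== LEMMAS AND PROOFS =====

-- A's first loop is the identity: the double swap cancels.
theorem pvPass1_id (l : List String) : pvPass1 l = l := by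
  induction l using pvPass1.induct with
  | case1 => rfl
  | case2 a => rfl
  | case3 a b t h ih =>
    obtain ⟨ha, hb⟩ := h; subst ha; subst hb
    simp [pvPass1, ih]
  | case4 a b t h ih => simp [pvPass1, h, ih]

theorem pvLoop1_id (n : Nat) (r : List String) : pvLoop1 n r = r := by
  induction n with
  | zero => rfl
  | succ n ih => simp [pvLoop1, pvPass1_id, ih]

theorem replicate_append_cons {α : Type} (n : Nat) (a : α) (t : List α) :
    List.replicate n a ++ a :: t = List.replicate (n + 1) a ++ t := by
  simp [List.replicate_succ']

-- one sweep preserves B's normal form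
theorem pvAltGo_pass (l : List String) : ∀ o d, pvAltGo o d (pvPass l).1 = pvAltGo o d l := by
  induction l using pvPass.induct with
  | case1 => intro o d; simp [pvPass]
  | case2 a => intro o d; simp [pvPass]
  | case3 a b t h ih =>
    intro o d
    obtain ⟨ha, hb⟩ := h
    subst ha; subst hb
    simp only [pvPass, if_pos (And.intro rfl rfl)]
    show pvAltGo o d ("O" :: (pvPass ("." :: t)).1) = pvAltGo o d ("." :: "O" :: t)
    simp only [pvAltGo, if_pos rfl, if_neg (by decide : ¬ ("." : String) = "O"),
      if_neg (by decide : ¬ ("O" : String) = ".")]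
    rw [ih]
    simp [pvAltGo]
  | case4 a b t h ih =>
    intro o d
    simp only [pvPass]
    rw [if_neg h]
    show pvAltGo o d (a :: (pvPass (b :: t)).1) = pvAltGo o d (a :: b :: t)
    by_cases hO : a = "O"
    · subst hO; simp only [pvAltGo, if_pos rfl]; exact ih _ _
    · by_cases hD : a = "."
      · subst hD
        simp only [pvAltGo, if_neg (by decide : ¬ ("." : String) = "O"), if_pos rfl]
        exact ih _ _
      · simp only [pvAltGo, if_neg hO, if_neg hD]
        rw [ih]
        simp only [pvAltGo]

-- "no adjacent (., O) pair"
def pvNoAdj : List String → Bool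
  | a :: b :: t => !(a = "." && b = "O") && pvNoAdj (b :: t)
  | _ => true

theorem pvPass_changed (l : List String) : (pvPass l).2 = !pvNoAdj l := by
  induction l using pvPass.induct with
  | case1 => simp [pvPass, pvNoAdj]
  | case2 a => simp [pvPass, pvNoAdj]
  | case3 a b t h ih =>
    obtain ⟨ha, hb⟩ := h; subst ha; subst hb
    simp [pvPass, pvNoAdj]
  | case4 a b t h ih =>
    simp only [pvPass]
    rw [if_neg h]
    have : (a = "." && b = "O") = false := by
      by_cases ha : a = "."
      · by_cases hb : b = "O"
        · exact absurd ⟨ha, hb⟩ h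
        · simp [hb]
      · simp [ha]
    simp [pvNoAdj, this, ih]

theorem pvPass_unchanged (l : List String) : (pvPass l).2 = false → (pvPass l).1 = l := by
  induction l using pvPass.induct with
  | case1 => intro _; simp [pvPass]
  | case2 a => intro _; simp [pvPass]
  | case3 a b t h ih =>
    obtain ⟨ha, hb⟩ := h; subst ha; subst hb
    simp [pvPass]
  | case4 a b t h ih =>
    simp only [pvPass]
    rw [if_neg h]
    intro hc
    simp only at hc
    rw [ih hc]

-- a row with no adjacent (., O) is its own normal form
theorem pvAltGo_self (l : List String) : ∀ o d, pvNoAdj l = true →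
    (d ≠ 0 → l.head? ≠ some "O") →
    pvAltGo o d l = List.replicate o "O" ++ List.replicate d "." ++ l := by
  induction l with
  | nil => intro o d _ _; simp [pvAltGo]
  | cons x t ih =>
    intro o d hna hd
    by_cases hO : x = "O"
    · subst hO
      have hd0 : d = 0 := by
        by_contra hne
        exact hd hne rfl
      subst hd0
      simp only [pvAltGo, if_pos rfl]
      have hna' : pvNoAdj t = true := by
        cases t with
        | nil => rfl
        | cons y u =>
          simp only [pvNoAdj, Bool.and_eq_true] at hna
          exact hna.2
      rw [ih (o + 1) 0 hna' (by intro h; exact absurd rfl h)]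
      simp [replicate_append_cons]
    · by_cases hD : x = "."
      · subst hD
        simp only [pvAltGo, if_neg (by decide : ¬ ("." : String) = "O"), if_pos rfl]
        have hna' : pvNoAdj t = true := by
          cases t with
          | nil => rfl
          | cons y u =>
            simp only [pvNoAdj, Bool.and_eq_true] at hna
            exact hna.2
        have hhd : t.head? ≠ some "O" := by
          cases t with
          | nil => simp
          | cons y u =>
            simp only [pvNoAdj, Bool.and_eq_true] at hna
            have h1 := hna.1
            intro hy
            have hy' : y = "O" := by
              simp only [List.head?] at hy
              injection hy
            simp [hy'] at h1
        rw [ih o (d + 1) hna' (fun _ => hhd)]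
        simp [replicate_append_cons]
      · simp only [pvAltGo, if_neg hO, if_neg hD]
        have hna' : pvNoAdj t = true := by
          cases t with
          | nil => rfl
          | cons y u =>
            simp only [pvNoAdj, Bool.and_eq_true] at hna
            exact hna.2
        rw [ih 0 0 hna' (by intro h; exact absurd rfl h)]
        simp

-- measure: dots that still have an O after them in the same segment
def pvHasO : List String → Bool
  | [] => false
  | x :: t => if x = "O" then true else if x = "." then pvHasO t else false

def pvDm : List String → Nat
  | [] => 0
  | x :: t => (if x = "." ∧ pvHasO t then 1 else 0) + pvDm t

theorem pvHasO_noAdj (t : List String) : pvHasO t = true → pvNoAdj ("." :: t) = false := by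
  induction t with
  | nil => intro h; simp [pvHasO] at h
  | cons y u ih =>
    intro h
    by_cases hO : y = "O"
    · subst hO; simp [pvNoAdj]
    · by_cases hD : y = "."
      · subst hD
        have h' : pvHasO u = true := by simpa [pvHasO] using h
        have := ih h'
        simp only [pvNoAdj] at this ⊢
        simp [this]
      · simp [pvHasO, hO, hD] at h

theorem pvHasO_pass (l : List String) : pvHasO (pvPass l).1 = pvHasO l := by
  induction l using pvPass.induct with
  | case1 => simp [pvPass]
  | case2 a => simp [pvPass]
  | case3 a b t h ih =>
    obtain ⟨ha, hb⟩ := h; subst ha; subst hb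
    simp [pvPass, pvHasO]
  | case4 a b t h ih =>
    simp only [pvPass]
    rw [if_neg h]
    show pvHasO (a :: (pvPass (b :: t)).1) = pvHasO (a :: b :: t)
    by_cases hO : a = "O"
    · simp [pvHasO, hO]
    · by_cases hD : a = "."
      · simp [pvHasO, hO, hD, ih]
      · simp [pvHasO, hO, hD]

theorem pvDm_pass (l : List String) :
    pvDm (pvPass l).1 ≤ pvDm l ∧ ((pvPass l).2 = true → pvDm (pvPass l).1 < pvDm l) := by
  induction l using pvPass.induct with
  | case1 => refine ⟨by simp [pvPass], by intro h; simp [pvPass] at h⟩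
  | case2 a => refine ⟨by simp [pvPass], by intro h; simp [pvPass] at h⟩
  | case3 a b t h ih =>
    obtain ⟨ha, hb⟩ := h; subst ha; subst hb
    simp only [pvPass, if_pos (And.intro rfl rfl)]
    have hrhs : pvDm ("." :: "O" :: t) = 1 + pvDm t := by
      simp [pvDm, pvHasO]
    have hlhs : pvDm ("O" :: (pvPass ("." :: t)).1) = pvDm (pvPass ("." :: t)).1 := by
      simp [pvDm]
    constructor
    · show pvDm ("O" :: (pvPass ("." :: t)).1) ≤ pvDm ("." :: "O" :: t)
      rw [hlhs, hrhs]
      by_cases hh : pvHasO t = true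
      · have hch : (pvPass ("." :: t)).2 = true := by
          rw [pvPass_changed, pvHasO_noAdj t hh]; rfl
        have := ih.2 hch
        have hdm : pvDm ("." :: t) = 1 + pvDm t := by simp [pvDm, hh]
        omega
      · have hh' : pvHasO t = false := by simpa using hh
        have hdm : pvDm ("." :: t) = pvDm t := by simp [pvDm, hh']
        have := ih.1
        omega
    · intro _
      show pvDm ("O" :: (pvPass ("." :: t)).1) < pvDm ("." :: "O" :: t)
      rw [hlhs, hrhs]
      by_cases hh : pvHasO t = true
      · have hch : (pvPass ("." :: t)).2 = true := by
          rw [pvPass_changed, pvHasO_noAdj t hh]; rfl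
        have := ih.2 hch
        have hdm : pvDm ("." :: t) = 1 + pvDm t := by simp [pvDm, hh]
        omega
      · have hh' : pvHasO t = false := by simpa using hh
        have hdm : pvDm ("." :: t) = pvDm t := by simp [pvDm, hh']
        have := ih.1
        omega
  | case4 a b t h ih =>
    simp only [pvPass]
    rw [if_neg h]
    have hcnt : (if a = "." ∧ pvHasO ((pvPass (b :: t)).1) then 1 else 0)
        = (if a = "." ∧ pvHasO (b :: t) then 1 else 0) := by
      rw [pvHasO_pass]
    have hl : pvDm (a :: (pvPass (b :: t)).1)
        = (if a = "." ∧ pvHasO (b :: t) then 1 else 0) + pvDm (pvPass (b :: t)).1 := by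
      simp only [pvDm, hcnt]
    have hr : pvDm (a :: b :: t)
        = (if a = "." ∧ pvHasO (b :: t) then 1 else 0) + pvDm (b :: t) := by
      simp only [pvDm]
    constructor
    · show pvDm (a :: (pvPass (b :: t)).1) ≤ pvDm (a :: b :: t)
      rw [hl, hr]
      have := ih.1
      omega
    · intro hc
      show pvDm (a :: (pvPass (b :: t)).1) < pvDm (a :: b :: t)
      rw [hl, hr]
      have := ih.2 (by simpa using hc)
      omega

theorem pvDm_lt_length (l : List String) : l ≠ [] → pvDm l < l.length := by
  induction l with
  | nil => intro h; exact absurd rfl h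
  | cons x t ih =>
    intro _
    cases t with
    | nil =>
      simp [pvDm, pvHasO]
    | cons y u =>
      have h1 := ih (by simp)
      have h2 : (if x = "." ∧ pvHasO (y :: u) then 1 else 0) ≤ 1 := by split <;> omega
      simp only [pvDm, List.length_cons] at *
      omega

-- enough fuel reaches B's normal form
theorem pvLoop2_alt (n : Nat) : ∀ r : List String, pvDm r < n → pvLoop2 n r = push_front_alt r := by
  induction n with
  | zero => intro r h; omega
  | succ n ih =>
    intro r h
    simp only [pvLoop2]
    by_cases hc : (pvPass r).2 = true
    · rw [if_pos hc]
      have hlt := (pvDm_pass r).2 hc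
      rw [ih (pvPass r).1 (by omega)]
      show push_front_alt (pvPass r).1 = push_front_alt r
      unfold push_front_alt
      exact pvAltGo_pass r 0 0
    · have hc' : (pvPass r).2 = false := by simpa using hc
      rw [hc']
      simp only [Bool.false_eq_true, if_false]
      rw [pvPass_unchanged r hc']
      have hna : pvNoAdj r = true := by
        have := pvPass_changed r
        rw [hc'] at this
        simpa using this.symm
      unfold push_front_alt
      rw [pvAltGo_self r 0 0 hna (by intro h; exact absurd rfl h)]
      simp

-- ===== VERDICT (by name: the statement is the Claim_ definition above) =====
theorem push_front_spec : Claim_equal_push_front := by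
  intro row _
  unfold Spec_push_front push_front
  rw [pvLoop1_id]
  cases row with
  | nil => rfl
  | cons x t =>
    exact pvLoop2_alt (x :: t).length (x :: t) (pvDm_lt_length (x :: t) (by simp))
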